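-- pv_equiv track=rewrite | github.com/nitpicker55555/multiclassification_llm | selenium_playground_classification.py | extract_cases
-- ===== SOURCE A (Python) =====
-- def extract_cases(lines):
--     cases = []
--     current_case = ""
--     for line in lines:
--         if line.strip().endswith("__________________________________________________"):
--             if current_case:
--                 cases.append(current_case.strip())
--             current_case = ""
--         else:
--             current_case += line
--     if current_case:
--         cases.append(current_case.strip())
--     return cases
-- ===== SOURCE B (Python) =====
-- def extract_cases(lines):
--     delim = "_" * 50
--     cases = []
--     rest = lines
--     while rest is not None:
--         # split off everything before the first delimiter line
--         for i, line in enumerate(rest):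
--             if line.strip().endswith(delim):
--                 head, rest = rest[:i], rest[i + 1:]
--                 break
--         else:
--             head, rest = rest, None
--         text = "".join(head)
--         if text:
--             cases.append(text.strip())
--     return cases
-- ===== Notes on version B (the rewrite author's own statement) =====
-- stated objective: alternative
-- what changed: B replaces A's one-pass scan with a string accumulator and inline flushes by repeatedly finding the first delimiter line, slicing off the head run, joining it, and emitting its stripped text if non-empty.
import Mathlib
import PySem

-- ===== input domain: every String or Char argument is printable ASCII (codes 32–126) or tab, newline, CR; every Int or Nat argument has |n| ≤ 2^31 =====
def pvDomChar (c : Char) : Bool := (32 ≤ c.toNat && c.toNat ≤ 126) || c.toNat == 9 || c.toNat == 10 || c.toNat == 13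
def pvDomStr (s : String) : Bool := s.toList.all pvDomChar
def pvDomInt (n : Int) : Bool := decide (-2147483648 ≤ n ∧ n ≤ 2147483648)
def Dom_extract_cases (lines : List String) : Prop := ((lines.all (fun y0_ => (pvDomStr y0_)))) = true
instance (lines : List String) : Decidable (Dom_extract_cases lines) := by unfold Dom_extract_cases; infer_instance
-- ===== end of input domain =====

-- B replaces A's one-pass accumulator scan by repeated split-at-first-delimiter (alternative decomposition; return value only).


def pvDelim : String := "__________________________________________________"

def pvIsDelim (l : String) : Bool := PySem.Str.endswith (PySem.Str.strip l) pvDelim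

-- ===== PORT A =====
-- state = (cases, current_case); the loop body follows A's branches in order
def extract_cases (lines : List String) : List String :=
  let st := lines.foldl
    (fun (st : List String × String) (line : String) =>
      if pvIsDelim line then
        (if st.2 ≠ "" then st.1 ++ [PySem.Str.strip st.2] else st.1, "")
      else
        (st.1, st.2 ++ line))
    ([], "")
  if st.2 ≠ "" then st.1 ++ [PySem.Str.strip st.2] else st.1

-- ===== PORT B =====
-- Source B's inner for/else: lines before the first delimiter, and the lines after it (none = no delimiter)
def pvSplitFirst (lines : List String) : List String × Option (List String) :=
  match lines with
  | [] => ([], none)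
  | l :: ls =>
    if pvIsDelim l then ([], some ls)
    else
      let p := pvSplitFirst ls
      (l :: p.1, p.2)

-- termination helper for the outer while loop (cited by decreasing_by)
theorem pvSplitFirst_lt : ∀ (ls rest : List String), (pvSplitFirst ls).2 = some rest → rest.length < ls.length := by
  intro ls
  induction ls with
  | nil => intro rest h; simp [pvSplitFirst] at h
  | cons l ls ih =>
    intro rest h
    by_cases hd : pvIsDelim l
    · simp [pvSplitFirst, hd] at h
      subst h; simp
    · simp [pvSplitFirst, hd] at h
      exact Nat.lt_succ_of_lt (ih rest h)

-- Source B's while loop: split off the head run, emit it if its joined text is non-empty, continue on the rest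
def extract_cases_alt (lines : List String) : List String :=
  let text := PySem.Str.join "" (pvSplitFirst lines).1
  let chunk := if text ≠ "" then [PySem.Str.strip text] else []
  match h : (pvSplitFirst lines).2 with
  | none => chunk
  | some rest => chunk ++ extract_cases_alt rest
termination_by lines.length
decreasing_by exact pvSplitFirst_lt lines rest h

-- ===== PRECONDITION & SPEC =====
def Spec_extract_cases (lines : List String) (out : List String) : Prop := out = extract_cases_alt lines
instance (lines : List String) (out : List String) : Decidable (Spec_extract_cases lines out) := by unfold Spec_extract_cases; infer_instance

-- ===== CLAIM (what is proved, stated in full; the proofs are below) =====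
def Claim_equal_extract_cases : Prop := ∀ (lines : List String), Dom_extract_cases lines → Spec_extract_cases lines (extract_cases lines)

-- ===== LEMMAS AND PROOFS =====

-- "".join over List String is plain concatenation
theorem pvJoinChars (parts : List String) :
    PySem.Str.join "" parts = String.ofList (parts.map String.toList).flatten := by
  induction parts with
  | nil => rfl
  | cons x xs ih =>
    cases xs with
    | nil => simp [PySem.Str.join, PySem.Chars.join, List.intercalate]
    | cons y ys =>
      simp only [PySem.Str.join, PySem.Chars.join, List.intercalate] at ih ⊢
      simp at ih ⊢
      exact ih

theorem pvJoin_nil : PySem.Str.join "" [] = "" := by decide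

theorem pvJoin_cons (l : String) (r : List String) :
    PySem.Str.join "" (l :: r) = l ++ PySem.Str.join "" r := by
  simp [pvJoinChars]

-- B's equation, with the dependent match flattened
theorem pvAlt_unfold (lines : List String) :
    extract_cases_alt lines =
      (if PySem.Str.join "" (pvSplitFirst lines).1 ≠ "" then
          [PySem.Str.strip (PySem.Str.join "" (pvSplitFirst lines).1)]
        else []) ++
        (match (pvSplitFirst lines).2 with
         | none => []
         | some rest => extract_cases_alt rest) := by
  rw [extract_cases_alt]
  cases hx : (pvSplitFirst lines).2 <;> simp

-- A's remaining computation as a function of (current_case, remaining lines)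
def pvG (cur : String) (lines : List String) : List String :=
  match lines with
  | [] => if cur ≠ "" then [PySem.Str.strip cur] else []
  | l :: ls =>
    if pvIsDelim l then (if cur ≠ "" then [PySem.Str.strip cur] else []) ++ pvG "" ls
    else pvG (cur ++ l) ls

-- A's fold-then-flush from state (cases, cur) is cases ++ pvG cur
theorem pvA_eq_g (lines : List String) :
    ∀ (cases : List String) (cur : String),
      (let st := lines.foldl
        (fun (st : List String × String) (line : String) =>
          if pvIsDelim line then
            (if st.2 ≠ "" then st.1 ++ [PySem.Str.strip st.2] else st.1, "")
          else
            (st.1, st.2 ++ line))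
        (cases, cur);
       if st.2 ≠ "" then st.1 ++ [PySem.Str.strip st.2] else st.1) = cases ++ pvG cur lines := by
  induction lines with
  | nil => intro cases cur; by_cases h : cur = "" <;> simp [pvG, h]
  | cons l ls ih =>
    intro cases cur
    by_cases hd : pvIsDelim l
    · by_cases h : cur = "" <;>
        simpa [pvG, hd, h, List.append_assoc] using
          ih (if cur ≠ "" then cases ++ [PySem.Str.strip cur] else cases) ""
    · simpa [pvG, hd] using ih cases (cur ++ l)

-- pvG cur is B's first chunk (with cur prefixed) followed by B's recursion on the rest
theorem pvG_eq_alt (lines : List String) :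
    ∀ (cur : String),
      pvG cur lines =
        (let text := cur ++ PySem.Str.join "" (pvSplitFirst lines).1;
         (if text ≠ "" then [PySem.Str.strip text] else []) ++
           (match (pvSplitFirst lines).2 with
            | none => []
            | some rest => extract_cases_alt rest)) := by
  induction lines with
  | nil => intro cur; simp [pvG, pvSplitFirst, pvJoin_nil]
  | cons l ls ih =>
    intro cur
    by_cases hd : pvIsDelim l
    · have halt : pvG "" ls = extract_cases_alt ls := by
        rw [pvAlt_unfold]
        have := ih ""
        simpa using this
      simp [pvG, pvSplitFirst, hd, pvJoin_nil, halt]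
    · have := ih (cur ++ l)
      simp [pvG, pvSplitFirst, hd, pvJoin_cons, String.append_assoc] at this ⊢
      exact this

-- ===== VERDICT (by name: the statement is the Claim_ definition above) =====
theorem extract_cases_spec : Claim_equal_extract_cases := by
  intro lines _
  show extract_cases lines = extract_cases_alt lines
  have h1 := pvA_eq_g lines [] ""
  have h2 := pvG_eq_alt lines ""
  rw [pvAlt_unfold]
  simp only [extract_cases] at h1 ⊢
  rw [h1, h2]
  simp
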